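-- pv_equiv track=rewrite | github.com/AP-MI-2021/lab-3-AdelaBura | try.py | same_number_of_divs
-- ===== SOURCE A (Python) =====
-- def number_of_divs(numar: int) -> int:
--     '''
--     Returneaza numarul de divizori proprii ai unui numar
--     :param numar: n nr natural
--     :return: nr de divizori proprii
--     '''
--
--     divizori = 0
--     for div in range(2, numar // 2 + 1):
--         if numar % div == 0:
--             divizori += 1
--     return divizori
--
-- def same_number_of_divs(lista) -> bool:
--     # Returneaza true daca toate numerele din lista au acelasi numar de divizori, fals in caz contrar
--     numar_de_divizori = number_of_divs(lista[0])
--     index = 0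
--     for element in lista:
--         if index != 0:
--             if number_of_divs(element) != numar_de_divizori:
--                 return False
--         index += 1
--     return True
-- ===== SOURCE B (Python) =====
-- def _proper_div_count(n):
--     # count of divisors of n in [2, n//2]: for n >= 2 this is (all divisors) - 2,
--     # counted via divisor pairs up to sqrt(n); for n < 2 it is 0.
--     if n < 2:
--         return 0
--     total = 0
--     d = 1
--     while d * d <= n:
--         if n % d == 0:
--             total += 1 if d * d == n else 2
--         d += 1
--     return total - 2
--
-- def same_number_of_divs(lista) -> bool:
--     k = _proper_div_count(lista[0])
--     return all(_proper_div_count(x) == k for x in lista[1:])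
-- ===== Notes on version B (the rewrite author's own statement) =====
-- stated objective: faster
-- what changed: Each number's proper-divisor count is computed by enumerating divisor pairs up to sqrt(n) and subtracting the two improper divisors, instead of trial-dividing by every candidate up to n//2; the list check becomes a plain all() over the tail.
import Mathlib
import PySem

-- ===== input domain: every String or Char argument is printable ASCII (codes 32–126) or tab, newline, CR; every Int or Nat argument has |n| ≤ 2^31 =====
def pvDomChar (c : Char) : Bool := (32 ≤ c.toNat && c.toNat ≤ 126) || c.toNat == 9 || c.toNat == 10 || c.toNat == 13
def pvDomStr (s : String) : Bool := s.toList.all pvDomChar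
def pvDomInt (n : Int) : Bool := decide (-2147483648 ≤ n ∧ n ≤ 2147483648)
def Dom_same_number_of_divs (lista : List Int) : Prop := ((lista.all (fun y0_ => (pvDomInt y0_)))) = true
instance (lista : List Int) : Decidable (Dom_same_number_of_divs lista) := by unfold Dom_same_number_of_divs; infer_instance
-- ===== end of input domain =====

-- B counts each number's proper divisors via divisor pairs up to sqrt(n) instead of
-- trial division up to n//2 (objective: faster, O(sqrt n) vs O(n) per element).

-- ===== PORT A =====
-- number_of_divs: count div in range(2, numar//2 + 1) with numar % div == 0
def number_of_divs (numar : Int) : Int :=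
  (PySem.List.pyRange 2 (PySem.Int.floordiv numar 2 + 1) 1).foldl
    (fun divizori div => if PySem.Int.mod numar div == 0 then divizori + 1 else divizori) 0

-- the 'for element in lista' loop with its running index
def pvALoop (k : Int) : List Int → Int → Bool
  | [], _ => true
  | element :: rest, index =>
      if index ≠ 0 then
        if number_of_divs element ≠ k then false
        else pvALoop k rest (index + 1)
      else pvALoop k rest (index + 1)

def same_number_of_divs (lista : List Int) : Bool :=
  match lista with
  | [] => false   -- lista[0] raises IndexError in Python; excluded by Pre_
  | x :: _ => pvALoop (number_of_divs x) lista 0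

-- ===== PORT B =====
-- while d*d <= n: count 1 for a square root, else 2 for the pair (d, n/d)
def pvBLoop (n : Int) (d : Nat) (total : Int) : Int :=
  if h : (d : Int) * (d : Int) ≤ n then
    pvBLoop n (d + 1)
      (if PySem.Int.mod n (d : Int) == 0 then
        total + (if (d : Int) * (d : Int) == n then 1 else 2)
      else total)
  else total
termination_by n.toNat + 1 - d
decreasing_by
  have hd : (d : Int) ≤ n := by nlinarith [h, Int.natCast_nonneg d]
  omega

def pvCountProper (n : Int) : Int :=
  if n < 2 then 0 else pvBLoop n 1 0 - 2

def same_number_of_divs_alt (lista : List Int) : Bool :=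
  match lista with
  | [] => false   -- lista[0] raises IndexError in Python; excluded by Pre_
  | x :: rest =>
      let k := pvCountProper x
      rest.all (fun y => pvCountProper y == k)

-- ===== PRECONDITION & SPEC =====
-- Pre_ excludes only the empty list, on which both Pythons raise IndexError at lista[0].
def Pre_same_number_of_divs (lista : List Int) : Prop := lista ≠ []
instance (lista : List Int) : Decidable (Pre_same_number_of_divs lista) := by
  unfold Pre_same_number_of_divs; infer_instance

def pvWitness_same_number_of_divs : List Int := ([6, 10, 22])

def Spec_same_number_of_divs (lista : List Int) (out : Bool) : Prop := out = same_number_of_divs_alt lista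
instance (lista : List Int) (out : Bool) : Decidable (Spec_same_number_of_divs lista out) := by unfold Spec_same_number_of_divs; infer_instance

-- ===== CLAIM (what is proved, stated in full; the proofs are below) =====
def Claim_equal_same_number_of_divs : Prop := ∀ (lista : List Int), Dom_same_number_of_divs lista → Pre_same_number_of_divs lista → Spec_same_number_of_divs lista (same_number_of_divs lista)

-- ===== LEMMAS AND PROOFS =====

-- countP over an Int range of Nat endpoints is a filtered-Ico cardinality
lemma countP_pyRange_nat (q : ℕ → Bool) (a k : ℕ) :
    (PySem.List.pyRange (a : Int) (k : Int) 1).countP (fun x => q x.toNat)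
      = ((Finset.Ico a k).filter (fun e => q e)).card := by
  induction k with
  | zero =>
      rw [PySem.List.pyRange_one_eq_nil (by exact_mod_cast Nat.zero_le a)]
      simp
  | succ k ih =>
      by_cases h : a ≤ k
      · have : ((k + 1 : ℕ) : Int) = (k : Int) + 1 := by push_cast; ring
        rw [this, PySem.List.pyRange_one_succ_right (by exact_mod_cast h),
          List.countP_append, ih, Nat.Ico_succ_right_eq_insert_Ico h,
          Finset.filter_insert]
        have hk : ((k : Int)).toNat = k := by simp
        by_cases hq : q k
        · rw [if_pos hq, Finset.card_insert_of_notMem (by simp)]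
          simp [List.countP, List.countP.go, hk, hq]
        · rw [if_neg (by simpa using hq)]
          simp [List.countP, List.countP.go, hk, hq]
      · have hak : (k : Int) + 1 ≤ (a : Int) := by exact_mod_cast Nat.lt_of_not_le h
        have : ((k + 1 : ℕ) : Int) = (k : Int) + 1 := by push_cast; ring
        rw [this, PySem.List.pyRange_one_eq_nil hak]
        rw [Finset.Ico_eq_empty (by omega)]
        simp

-- A's count on a natural number m is the number of divisors of m in [2, m/2]
lemma number_of_divs_eq_card (m : ℕ) :
    number_of_divs (m : Int)
      = (((Finset.Ico 2 (m / 2 + 1)).filter (fun e => e ∣ m)).card : Int) := by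
  unfold number_of_divs
  rw [PySem.List.foldl_count_if, zero_add]
  have h2 : PySem.Int.floordiv (m : Int) 2 + 1 = ((m / 2 + 1 : ℕ) : Int) := by
    rw [show ((2 : Int)) = ((2 : ℕ) : Int) from rfl, PySem.Int.floordiv_natCast]
    push_cast; ring
  have ha : (2 : Int) = ((2 : ℕ) : Int) := rfl
  rw [h2, ha]
  have hc : (PySem.List.pyRange ((2 : ℕ) : Int) ((m / 2 + 1 : ℕ) : Int) 1).countP
        (fun x => PySem.Int.mod (m : Int) x == 0)
      = (PySem.List.pyRange ((2 : ℕ) : Int) ((m / 2 + 1 : ℕ) : Int) 1).countP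
        (fun x => decide (x.toNat ∣ m)) := by
    apply List.countP_congr
    intro x hx
    have hx2 : ((2 : ℕ) : Int) ≤ x := (PySem.List.mem_pyRange_one.1 hx).1
    have hxt : ((x.toNat : ℕ) : Int) = x := by omega
    simp only [beq_iff_eq, decide_eq_true_eq]
    rw [PySem.Int.mod_eq_zero_iff_dvd]
    conv_lhs => rw [← hxt]
    exact Int.natCast_dvd_natCast
  rw [hc, countP_pyRange_nat (fun e => decide (e ∣ m)) 2 (m / 2 + 1)]
  norm_num

-- the divisors of m ≥ 2 in [2, m/2] are all divisors except 1 and m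
lemma card_mid_divisors (m : ℕ) (hm : 2 ≤ m) :
    ((Finset.Ico 2 (m / 2 + 1)).filter (fun e => e ∣ m)).card = m.divisors.card - 2 := by
  have hsub : ({1, m} : Finset ℕ) ⊆ m.divisors := by
    intro d hd
    simp only [Finset.mem_insert, Finset.mem_singleton] at hd
    rcases hd with h1 | h1 <;> subst h1 <;> simp [Nat.mem_divisors] <;> omega
  have hset : (Finset.Ico 2 (m / 2 + 1)).filter (fun e => e ∣ m) = m.divisors \ {1, m} := by
    ext d
    simp only [Finset.mem_filter, Finset.mem_Ico, Finset.mem_sdiff, Nat.mem_divisors,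
      Finset.mem_insert, Finset.mem_singleton]
    constructor
    · rintro ⟨⟨h2, hlt⟩, hdvd⟩
      have hhalf : m / 2 < m := by omega
      exact ⟨⟨hdvd, by omega⟩, by omega⟩
    · rintro ⟨⟨hdvd, hne⟩, hd1m⟩
      have hd0 : 0 < d := Nat.pos_of_dvd_of_pos hdvd (by omega)
      obtain ⟨e, he⟩ := hdvd
      have he0 : e ≠ 0 := by rintro rfl; omega
      have he1 : e ≠ 1 := by rintro rfl; omega
      have hde : d * 2 ≤ m := by
        calc d * 2 ≤ d * e := by
              exact Nat.mul_le_mul_left d (by omega)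
          _ = m := he.symm
      have hdh : d ≤ m / 2 := (Nat.le_div_iff_mul_le (by norm_num)).2 hde
      refine ⟨⟨?_, by omega⟩, ⟨e, he⟩⟩
      have : d ≠ 1 := by tauto
      omega
  rw [hset, Finset.card_sdiff, Finset.inter_eq_left.mpr hsub, Finset.card_pair (by omega)]

lemma two_le_card_divisors (m : ℕ) (hm : 2 ≤ m) : 2 ≤ m.divisors.card := by
  have hsub : ({1, m} : Finset ℕ) ⊆ m.divisors := by
    intro d hd
    simp only [Finset.mem_insert, Finset.mem_singleton] at hd
    rcases hd with h1 | h1 <;> subst h1 <;> simp [Nat.mem_divisors] <;> omega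
  calc 2 = ({1, m} : Finset ℕ).card := (Finset.card_pair (by omega)).symm
    _ ≤ m.divisors.card := Finset.card_le_card hsub

-- B's loop sums the pair-contributions of the divisors in [d, sqrt m]
lemma pvBLoop_eq (m : ℕ) (d : ℕ) (total : Int) :
    pvBLoop (m : Int) d total
      = total + ∑ e ∈ (Finset.Icc d (Nat.sqrt m)).filter (fun e => e ∣ m),
          (if e * e = m then (1 : Int) else 2) := by
  by_cases h : (d : Int) * (d : Int) ≤ (m : Int)
  · have hds : d ≤ Nat.sqrt m := Nat.le_sqrt.mpr (by exact_mod_cast h)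
    rw [pvBLoop, dif_pos h, pvBLoop_eq m (d + 1)]
    rw [← Finset.insert_Icc_add_one_left_eq_Icc hds, Finset.filter_insert]
    have hmod : (PySem.Int.mod (m : Int) (d : Int) == 0) = decide (d ∣ m) := by
      rw [Bool.eq_iff_iff]
      simp only [beq_iff_eq, decide_eq_true_eq, PySem.Int.mod_natCast]
      exact_mod_cast (Nat.dvd_iff_mod_eq_zero).symm
    have hsq : ((d : Int) * (d : Int) == (m : Int)) = decide (d * d = m) := by
      rw [Bool.eq_iff_iff]
      simp only [beq_iff_eq, decide_eq_true_eq]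
      exact_mod_cast Iff.rfl
    rw [hmod, hsq]
    by_cases hdvd : d ∣ m
    · rw [if_pos hdvd, Finset.sum_insert (by simp [Finset.mem_Icc])]
      by_cases hsqm : d * d = m <;> simp [hsqm, hdvd] <;> ring
    · rw [if_neg hdvd, if_neg (by simp [hdvd])]
  · rw [pvBLoop, dif_neg h]
    have hlt : Nat.sqrt m < d := by
      by_contra hc
      exact h (by exact_mod_cast Nat.le_sqrt.mp (Nat.le_of_not_lt hc))
    rw [Finset.Icc_eq_empty (by omega)]
    simp
termination_by Nat.sqrt m + 1 - d
decreasing_by omega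

-- pairing d ↦ m/d: as many divisors below sqrt m as above it
lemma card_low_eq_card_high (m : ℕ) (hm : 1 ≤ m) :
    (m.divisors.filter (fun d => d * d < m)).card
      = (m.divisors.filter (fun d => m < d * d)).card := by
  have hm0 : m ≠ 0 := by omega
  apply Finset.card_nbij' (fun d => m / d) (fun d => m / d)
  · intro d hd
    simp only [Finset.coe_filter, Set.mem_setOf_eq, Nat.mem_divisors] at hd ⊢
    obtain ⟨⟨hdvd, _⟩, hlt⟩ := hd
    have hd0 : 0 < d := Nat.pos_of_dvd_of_pos hdvd (by omega)
    obtain ⟨e, he⟩ := hdvd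
    have hde : m / d = e := by rw [he, Nat.mul_div_cancel_left e hd0]
    refine ⟨⟨Nat.div_dvd_of_dvd ⟨e, he⟩, hm0⟩, ?_⟩
    rw [hde]
    nlinarith [he, hlt, hd0]
  · intro e he'
    simp only [Finset.coe_filter, Set.mem_setOf_eq, Nat.mem_divisors] at he' ⊢
    obtain ⟨⟨hdvd, _⟩, hlt⟩ := he'
    have he0 : 0 < e := Nat.pos_of_dvd_of_pos hdvd (by omega)
    obtain ⟨f, hf⟩ := hdvd
    have hfe : m / e = f := by rw [hf, Nat.mul_div_cancel_left f he0]
    refine ⟨⟨Nat.div_dvd_of_dvd ⟨f, hf⟩, hm0⟩, ?_⟩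
    rw [hfe]
    nlinarith [hf, hlt, he0]
  · intro d hd
    simp only [Finset.coe_filter, Set.mem_setOf_eq, Nat.mem_divisors] at hd
    exact Nat.div_div_self hd.1.1 hm0
  · intro e he'
    simp only [Finset.coe_filter, Set.mem_setOf_eq, Nat.mem_divisors] at he'
    exact Nat.div_div_self he'.1.1 hm0

lemma sum_pairs_eq_card (m : ℕ) (hm : 1 ≤ m) :
    (∑ e ∈ (Finset.Icc 1 (Nat.sqrt m)).filter (fun e => e ∣ m),
        (if e * e = m then (1 : Int) else 2)) = (m.divisors.card : Int) := by
  have hm0 : m ≠ 0 := by omega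
  have hset : (Finset.Icc 1 (Nat.sqrt m)).filter (fun e => e ∣ m)
      = m.divisors.filter (fun d => d * d ≤ m) := by
    ext d
    simp only [Finset.mem_filter, Finset.mem_Icc, Nat.mem_divisors]
    constructor
    · rintro ⟨⟨h1, hs⟩, hdvd⟩
      exact ⟨⟨hdvd, hm0⟩, Nat.le_sqrt.mp hs⟩
    · rintro ⟨⟨hdvd, _⟩, hsq⟩
      exact ⟨⟨Nat.pos_of_dvd_of_pos hdvd (by omega), Nat.le_sqrt.mpr hsq⟩, hdvd⟩
  rw [hset]
  have hsplit : ∀ e ∈ m.divisors.filter (fun d => d * d ≤ m),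
      (if e * e = m then (1 : Int) else 2) = 1 + (if e * e ≠ m then (1 : Int) else 0) := by
    intro e _
    by_cases h : e * e = m <;> simp [h]
  rw [Finset.sum_congr rfl hsplit, Finset.sum_add_distrib, Finset.sum_const,
    Finset.sum_boole, Finset.filter_filter]
  have hlow : m.divisors.filter (fun d => d * d ≤ m ∧ d * d ≠ m)
      = m.divisors.filter (fun d => d * d < m) := by
    apply Finset.filter_congr
    intro d _
    constructor
    · rintro ⟨h1, h2⟩; omega
    · intro h; omega
  rw [hlow, card_low_eq_card_high m hm]
  have hcomp : m.divisors.filter (fun d => m < d * d)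
      = m.divisors.filter (fun d => ¬ d * d ≤ m) := by
    apply Finset.filter_congr
    intro d _
    omega
  rw [hcomp]
  have hadd := Finset.card_filter_add_card_filter_not
    (s := m.divisors) (p := fun d => d * d ≤ m)
  simp only [nsmul_eq_mul, mul_one]
  omega

-- pointwise agreement of the two counting routines
lemma count_eq (n : Int) : pvCountProper n = number_of_divs n := by
  by_cases hn : n < 2
  · unfold pvCountProper number_of_divs
    rw [if_pos hn]
    have hfd : PySem.Int.floordiv n 2 < 1 := (PySem.Int.floordiv_lt_iff_lt_mul (by norm_num)).2 (by omega)
    rw [PySem.List.pyRange_one_eq_nil (by omega)]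
    simp
  · set m := n.toNat with hm
    have hm2 : 2 ≤ m := by omega
    have hnm : n = (m : Int) := by omega
    rw [hnm]
    unfold pvCountProper
    rw [if_neg (by omega), pvBLoop_eq m 1 0, zero_add,
      sum_pairs_eq_card m (by omega), number_of_divs_eq_card m, card_mid_divisors m hm2]
    have h2c := two_le_card_divisors m hm2
    omega

lemma pvALoop_eq_all (k : Int) (rest : List Int) (index : Int) (h : 1 ≤ index) :
    pvALoop k rest index = rest.all (fun y => number_of_divs y == k) := by
  induction rest generalizing index with
  | nil => simp [pvALoop]
  | cons e r ih =>
      rw [pvALoop]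
      have h0 : index ≠ 0 := by omega
      by_cases he : number_of_divs e = k
      · simp [h0, he, ih (index + 1) (by omega)]
      · simp [h0, he]

-- ===== VERDICT (by name: the statement is the Claim_ definition above) =====
theorem same_number_of_divs_spec : Claim_equal_same_number_of_divs := by
  intro lista _ hpre
  unfold Spec_same_number_of_divs
  match lista with
  | [] => exact absurd rfl hpre
  | x :: rest =>
      show pvALoop (number_of_divs x) (x :: rest) 0 = _
      rw [pvALoop, if_neg (by omega), pvALoop_eq_all _ _ (0 + 1) (by omega)]
      show _ = rest.all fun y => pvCountProper y == pvCountProper x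
      simp only [count_eq]
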